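-- pv_equiv track=rewrite | github.com/florianmai/word2mat | mutils.py | _all_option_combinations
-- ===== SOURCE A (Python) =====
-- from itertools import product
--
-- def _all_option_combinations(space):
--
--     names = [name for name, _ in space.items()]
--     values = [values for _, values in space.items()]
--
--     val_combinations = product(*values)
--
--     combinations = []
--     for combi in val_combinations:
--         new_param_dict = {}
--         for i, val in enumerate(combi):
--             new_param_dict[names[i]] = val
--
--         combinations.append(new_param_dict)
--
--     return combinations
-- ===== SOURCE B (Python) =====
-- def _all_option_combinations(space):
--     result = [{}]
--     for name, vals in space.items():
--         result = [{**d, name: v} for d in result for v in vals]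
--     return result
-- ===== Notes on version B (the rewrite author's own statement) =====
-- stated objective: simpler
-- what changed: Replaces itertools.product plus an enumerate/index reconstruction loop with a single incremental fold that cross-multiplies a running list of partial dicts with each option's values.
import Mathlib
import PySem

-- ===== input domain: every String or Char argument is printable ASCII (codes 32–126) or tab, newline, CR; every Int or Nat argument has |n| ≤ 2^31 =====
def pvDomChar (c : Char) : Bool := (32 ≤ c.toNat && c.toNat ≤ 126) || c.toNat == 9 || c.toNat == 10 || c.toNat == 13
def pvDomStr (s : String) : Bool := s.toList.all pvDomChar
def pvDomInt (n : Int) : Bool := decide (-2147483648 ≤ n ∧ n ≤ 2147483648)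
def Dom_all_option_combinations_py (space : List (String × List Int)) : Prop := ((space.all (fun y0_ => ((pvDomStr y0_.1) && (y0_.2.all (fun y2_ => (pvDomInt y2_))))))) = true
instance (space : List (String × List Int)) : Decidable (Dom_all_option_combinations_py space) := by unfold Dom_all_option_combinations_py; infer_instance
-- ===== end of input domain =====

-- B replaces itertools.product + an index-based dict-reconstruction loop by a single
-- incremental fold that cross-multiplies a running list of partial dicts (simpler, same cost).


-- ===== PORT A =====
-- itertools.product(*values): tuples in order, rightmost component varying fastest
def pyProduct : List (List Int) → List (List Int)
  | [] => [[]]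
  | vs :: rest => vs.flatMap (fun v => (pyProduct rest).map (v :: ·))

def all_option_combinations_py (space : List (String × List Int)) : List (List (String × Int)) :=
  let names := space.map (·.1)
  let values := space.map (·.2)
  let val_combinations := pyProduct values
  -- for combi in val_combinations: build new_param_dict by new_param_dict[names[i]] = val
  -- (names[i]: i always in range since each combi has length = len(values) = len(names);
  --  the "" default of pyGetD is therefore never used)
  (val_combinations.map (fun combi =>
    ((PySem.List.enumerate combi).foldl
      (fun d iv => d.insert (PySem.List.pyGetD names iv.1 "") iv.2)
      (PySem.Dict.empty : PySem.Dict String Int)).items))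

-- ===== PORT B =====
def all_option_combinations_py_alt (space : List (String × List Int)) : List (List (String × Int)) :=
  (space.foldl
    (fun acc nv => acc.flatMap (fun d => nv.2.map (fun v => d.insert nv.1 v)))
    ([PySem.Dict.empty] : List (PySem.Dict String Int))).map PySem.Dict.items

-- ===== PRECONDITION & SPEC =====
def Spec_all_option_combinations_py (space : List (String × List Int)) (out : List (List (String × Int))) : Prop := out = all_option_combinations_py_alt space
instance (space : List (String × List Int)) (out : List (List (String × Int))) : Decidable (Spec_all_option_combinations_py space out) := by unfold Spec_all_option_combinations_py; infer_instance

-- ===== CLAIM (what is proved, stated in full; the proofs are below) =====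
def Claim_equal_all_option_combinations_py : Prop := ∀ (space : List (String × List Int)), Dom_all_option_combinations_py space → Spec_all_option_combinations_py space (all_option_combinations_py space)

-- ===== LEMMAS AND PROOFS =====

-- every tuple produced by pyProduct has one component per value list
lemma pyProduct_length {ls : List (List Int)} {c : List Int} (h : c ∈ pyProduct ls) :
    c.length = ls.length := by
  induction ls generalizing c with
  | nil => simp [pyProduct] at h; simp [h]
  | cons vs rest ih =>
      simp [pyProduct] at h
      obtain ⟨v, _, t, ht, rfl⟩ := h
      simp [ih ht]

-- insert the pairs (names[j], combi[j]) one by one, as a zip-fold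
def insertZip (d : PySem.Dict String Int) : List String → List Int → PySem.Dict String Int
  | n :: ns, v :: vs => insertZip (d.insert n v) ns vs
  | _, _ => d

-- A's inner loop (enumerate + names[i]) equals the zip-fold, for any offset k
lemma enumFold_eq_insertZip (combi : List Int) (full : List String) :
    ∀ (k : Nat) (d : PySem.Dict String Int), combi.length + k = full.length →
    (PySem.List.enumerate combi (k : Int)).foldl
        (fun d iv => d.insert (PySem.List.pyGetD full iv.1 "") iv.2) d
      = insertZip d (full.drop k) combi := by
  induction combi with
  | nil => intro k d _; simp [PySem.List.enumerate_nil, insertZip]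
  | cons c cs ih =>
      intro k d hlen
      have hk : k < full.length := by simp at hlen; omega
      rw [PySem.List.enumerate_cons]
      have hdrop : full.drop k = full[k] :: full.drop (k + 1) :=
        List.drop_eq_getElem_cons hk
      have hget : PySem.List.pyGetD full (k : Int) "" = full[k] := by
        rw [PySem.List.pyGetD_natCast]
        simp [List.getD, hk]
      simp only [List.foldl_cons, hget, hdrop, insertZip]
      have : ((k : Int) + 1) = ((k + 1 : Nat) : Int) := by push_cast; ring
      rw [this, ih (k + 1) _ (by simp at hlen ⊢; omega)]

-- B's fold, from an arbitrary accumulator, is the product mapped through insertZip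
lemma foldl_eq_product_insertZip (space : List (String × List Int)) :
    ∀ (acc : List (PySem.Dict String Int)),
    space.foldl (fun acc nv => acc.flatMap (fun d => nv.2.map (fun v => d.insert nv.1 v))) acc
      = acc.flatMap (fun d =>
          (pyProduct (space.map (·.2))).map (fun combi => insertZip d (space.map (·.1)) combi)) := by
  induction space with
  | nil => intro acc; simp [pyProduct, insertZip]
  | cons nv rest ih =>
      intro acc
      simp only [List.foldl_cons, ih, pyProduct, List.map_cons]
      rw [List.flatMap_assoc]
      apply List.flatMap_congr
      intro d _
      simp only [List.flatMap_map, List.map_flatMap, List.map_map]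
      apply List.flatMap_congr
      intro v _
      apply List.map_congr_left
      intro t _
      simp [insertZip, Function.comp]

-- ===== VERDICT (by name: the statement is the Claim_ definition above) =====
theorem all_option_combinations_py_spec : Claim_equal_all_option_combinations_py := by
  intro space _
  unfold Spec_all_option_combinations_py all_option_combinations_py all_option_combinations_py_alt
  rw [foldl_eq_product_insertZip]
  simp only [List.flatMap_cons, List.flatMap_nil, List.append_nil, List.map_map]
  apply List.map_congr_left
  intro combi hc
  have hlen : combi.length + 0 = (space.map (·.1)).length := by
    simpa using pyProduct_length hc
  have := enumFold_eq_insertZip combi (space.map (·.1)) 0 PySem.Dict.empty hlen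
  simp only [Int.natCast_zero, List.drop_zero] at this
  simp [this, Function.comp]
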